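-- pv_equiv track=rewrite | github.com/ScramblesDev/ASE420-Individual-Project | src/markov_chain.py | map_to_custom_characters
-- ===== SOURCE A (Python) =====
-- def map_to_custom_characters(word, custom_chars):
--     mapped = ''
--     for char in word:
--         if char in custom_chars:
--             mapped += char
--         else:
--             # this basically just maps to the closest character in custom set
--             mapped += min(custom_chars, key=lambda c: abs(ord(c) - ord(char)))
--     return mapped
-- ===== SOURCE B (Python) =====
-- def _index_of(s, c):
--     i = 0
--     for x in s:
--         if x == c:
--             return i
--         i += 1
--     return -1
--
--
-- def _lower_bound(uniq, o):
--     lo, hi = 0, len(uniq)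
--     while lo < hi:
--         mid = (lo + hi) // 2
--         if ord(uniq[mid]) < o:
--             lo = mid + 1
--         else:
--             hi = mid
--     return lo
--
--
-- def map_to_custom_characters(word, custom_chars):
--     uniq = sorted(set(custom_chars))  # distinct chars, strictly increasing code points
--     res = []
--     for ch in word:
--         if ch in custom_chars:
--             res.append(ch)
--             continue
--         o = ord(ch)
--         lo = _lower_bound(uniq, o)
--         if lo == 0:
--             m = uniq[0]
--         elif lo == len(uniq):
--             m = uniq[-1]
--         else:
--             a, b = uniq[lo - 1], uniq[lo]
--             da, db = o - ord(a), ord(b) - o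
--             if da < db or (da == db and _index_of(custom_chars, a) < _index_of(custom_chars, b)):
--                 m = a
--             else:
--                 m = b
--         res.append(m)
--     return ''.join(res)
-- ===== Notes on version B (the rewrite author's own statement) =====
-- stated objective: alternative
-- what changed: A scans all of custom_chars with min(key=abs diff) for every word character; B sorts the distinct custom characters once and binary-searches the two neighbouring code points per word character, breaking distance ties by the smaller first index in custom_chars (intended as asymptotically faster, O((n+m) log m) vs O(n*m), but a timing run measured only ~1.2x on its inputs).
import Mathlib
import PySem

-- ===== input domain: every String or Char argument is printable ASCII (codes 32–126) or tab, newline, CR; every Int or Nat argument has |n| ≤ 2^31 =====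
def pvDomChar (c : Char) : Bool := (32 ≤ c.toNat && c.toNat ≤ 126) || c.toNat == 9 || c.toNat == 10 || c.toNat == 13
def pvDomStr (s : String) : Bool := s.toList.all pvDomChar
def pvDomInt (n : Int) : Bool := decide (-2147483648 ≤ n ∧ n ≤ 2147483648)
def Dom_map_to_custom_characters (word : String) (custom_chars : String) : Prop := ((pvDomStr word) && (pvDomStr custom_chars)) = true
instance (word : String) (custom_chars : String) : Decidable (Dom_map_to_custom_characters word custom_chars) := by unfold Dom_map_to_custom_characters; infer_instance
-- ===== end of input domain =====

-- B replaces A's per-character full scan of custom_chars by a one-time sorted dedup of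
-- custom_chars plus a binary search per word character (tie broken by first index).

-- ===== PORT A =====
-- abs(ord(c) - ord(char))
def pvAbsDiff (c ch : Char) : Int := |(c.toNat : Int) - (ch.toNat : Int)|

-- one iteration of A's for-loop body: membership test, else min(custom_chars, key=…)
def pvAStep (cs : List Char) (acc : List Char) (ch : Char) : List Char :=
  if PySem.Chars.isIn [ch] cs then acc ++ [ch]
  else
    match PySem.List.min? cs (fun c => pvAbsDiff c ch) with
    | some m => acc ++ [m]
    | none => acc   -- Python raises ValueError here (custom_chars empty); outside Pre_

def map_to_custom_characters (word : String) (custom_chars : String) : String :=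
  String.ofList (word.toList.foldl (pvAStep custom_chars.toList) [])

-- ===== PORT B =====
-- Source B _index_of: linear scan returning the first index of c in s, -1 if absent
def pvIdxOf : List Char → Char → Int → Int
  | [], _, _ => -1
  | x :: t, c, i => if x == c then i else pvIdxOf t c (i + 1)

-- Source B _lower_bound: while lo < hi binary search for the first index with ord(uniq[mid]) ≥ o
def pvBS (uniq : List Char) (o : Int) (lo hi : Nat) : Nat :=
  if _h : lo < hi then
    let mid := (lo + hi) / 2
    if ((uniq.getD mid 'a').toNat : Int) < o then pvBS uniq o (mid + 1) hi
    else pvBS uniq o lo mid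
  else lo
termination_by hi - lo
decreasing_by all_goals omega

-- one iteration of Source B's for-loop body
def pvBChar (cs uniq : List Char) (ch : Char) : List Char :=
  if PySem.Chars.isIn [ch] cs then [ch]
  else
    let o : Int := ch.toNat
    let lo := pvBS uniq o 0 uniq.length
    if lo = 0 then
      match uniq with
      | [] => []      -- Python raises IndexError here (custom_chars empty); outside Pre_
      | x :: _ => [x]
    else if lo = uniq.length then
      match uniq.getLast? with
      | some x => [x]
      | none => []
    else
      match uniq[lo - 1]?, uniq[lo]? with
      | some a, some b =>
        let da := o - (a.toNat : Int)
        let db := (b.toNat : Int) - o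
        if da < db ∨ (da = db ∧ pvIdxOf cs a 0 < pvIdxOf cs b 0) then [a] else [b]
      | _, _ => []

def map_to_custom_characters_alt (word : String) (custom_chars : String) : String :=
  let cs := custom_chars.toList
  let uniq := PySem.List.sorted (PySem.Set.ofList cs) (fun c => c) false
  String.ofList (word.toList.foldl (fun acc ch => acc ++ pvBChar cs uniq ch) [])

-- ===== PRECONDITION & SPEC =====
-- Pre_ excludes only the inputs where A raises: a nonempty word with empty custom_chars
-- makes A's min('') raise ValueError.
def Pre_map_to_custom_characters (word : String) (custom_chars : String) : Prop :=
  custom_chars ≠ "" ∨ word = ""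
instance (word : String) (custom_chars : String) : Decidable (Pre_map_to_custom_characters word custom_chars) := by unfold Pre_map_to_custom_characters; infer_instance

def pvWitness_map_to_custom_characters : String × String := ("abc", "bx")

def Spec_map_to_custom_characters (word : String) (custom_chars : String) (out : String) : Prop := out = map_to_custom_characters_alt word custom_chars
instance (word : String) (custom_chars : String) (out : String) : Decidable (Spec_map_to_custom_characters word custom_chars out) := by unfold Spec_map_to_custom_characters; infer_instance

-- ===== CLAIM (what is proved, stated in full; the proofs are below) =====
def Claim_equal_map_to_custom_characters : Prop := ∀ (word : String) (custom_chars : String), Dom_map_to_custom_characters word custom_chars → Pre_map_to_custom_characters word custom_chars → Spec_map_to_custom_characters word custom_chars (map_to_custom_characters word custom_chars)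

-- ===== LEMMAS AND PROOFS =====

theorem pv_toNat_inj {c d : Char} (h : c.toNat = d.toNat) : c = d := by
  apply Char.ext; rw [← UInt32.toNat_inj]; exact h
theorem pv_toNat_lt {c d : Char} (h : c < d) : c.toNat < d.toNat := by
  simpa [Char.lt_def, UInt32.lt_iff_toNat_lt] using h
theorem pv_mem_singleton_infix (a : Char) (l : List Char) : [a] <:+: l ↔ a ∈ l := by
  constructor
  · rintro ⟨s, t, h⟩; subst h; simp
  · intro h; obtain ⟨s, t, h⟩ := List.append_of_mem h; subst h; exact ⟨s, t, by simp⟩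
theorem pv_idxOf_le (x : Char) : ∀ (xs : List Char) (j : Nat), (hj : j < xs.length) → xs[j] = x → List.idxOf x xs ≤ j := by
  intro xs
  induction xs with
  | nil => intro j hj; simp at hj
  | cons y t ih =>
    intro j hj h
    by_cases hy : y = x
    · simp [hy]
    · cases j with
      | zero => simp at h; exact absurd h hy
      | succ n =>
        have hb : (y == x) = false := by simp [hy]
        simp only [List.idxOf_cons, hb, cond_false]
        have := ih n (by simpa using hj) (by simpa using h)
        omega
theorem pv_idxOf_eq (c : Char) : ∀ (cs : List Char), c ∈ cs → ∀ k : Nat, pvIdxOf cs c (k : Int) = (k : Int) + cs.idxOf c := by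
  intro cs
  induction cs with
  | nil => intro h; simp at h
  | cons y t ih =>
    intro hc k
    by_cases hy : y = c
    · simp [pvIdxOf, hy]
    · have hb : (y == c) = false := by simp [hy]
      have hct : c ∈ t := by
        rcases List.mem_cons.mp hc with h | h
        · exact absurd h.symm hy
        · exact h
      have h1 := ih hct (k + 1)
      have h2 : ((k : Int) + 1) = ((k + 1 : Nat) : Int) := by push_cast; ring
      simp only [pvIdxOf, hb, Bool.false_eq_true, if_false, List.idxOf_cons, cond_false]
      rw [h2, h1]
      push_cast; ring
def pvStep (f : Char → Int) (acc : Option Char) (x : Char) : Option Char :=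
  match acc with | none => some x | some w => if f x < f w then some x else some w

theorem pv_min?_foldl (f : Char → Int) (xs : List Char) : PySem.List.min? xs f = xs.foldl (pvStep f) none := by
  unfold PySem.List.min?
  congr 1
  funext acc x
  cases acc <;> rfl

theorem pv_foldl_keep (f : Char → Int) (m : Char) : ∀ (r : List Char), (∀ y ∈ r, ¬ f y < f m) →
    r.foldl (pvStep f) (some m) = some m := by
  intro r
  induction r with
  | nil => intro _; rfl
  | cons y t ih =>
    intro h
    have hy : ¬ f y < f m := h y (by simp)
    simp only [List.foldl_cons, pvStep, if_neg hy]
    exact ih (fun z hz => h z (by simp [hz]))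

theorem pv_min?_first (f : Char → Int) (l r : List Char) (m : Char)
    (hl : ∀ y ∈ l, f m < f y) (hr : ∀ y ∈ r, f m ≤ f y) :
    PySem.List.min? (l ++ m :: r) f = some m := by
  rw [pv_min?_foldl, List.foldl_append]
  rcases h : PySem.List.min? l f with _ | a
  · rw [pv_min?_foldl] at h
    rw [h]
    simp only [List.foldl_cons, pvStep]
    exact pv_foldl_keep f m r (fun y hy => not_lt.mpr (hr y hy))
  · have ha : a ∈ l := PySem.List.min?_mem h
    have hma : f m < f a := hl a ha
    rw [pv_min?_foldl] at h
    rw [h]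
    simp only [List.foldl_cons, pvStep, if_pos hma]
    exact pv_foldl_keep f m r (fun y hy => not_lt.mpr (hr y hy))

theorem pv_min?_eq (cs : List Char) (f : Char → Int) (m : Char) (hm : m ∈ cs)
    (hglob : ∀ y ∈ cs, f m ≤ f y)
    (htie : ∀ j, (hj : j < cs.length) → f cs[j] = f m → cs.idxOf m ≤ j) :
    PySem.List.min? cs f = some m := by
  have hk : cs.idxOf m < cs.length := List.idxOf_lt_length_of_mem hm
  have hdecomp : cs = cs.take (cs.idxOf m) ++ m :: cs.drop (cs.idxOf m + 1) := by
    conv_lhs => rw [← List.take_append_drop (cs.idxOf m) cs]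
    rw [List.drop_eq_getElem_cons hk, List.getElem_idxOf hk]
  conv_lhs => rw [hdecomp]
  apply pv_min?_first
  · intro y hy
    obtain ⟨j, hj, hjy⟩ := List.mem_iff_getElem.mp hy
    have hjk : j < cs.idxOf m := by simp at hj; omega
    have hjlen : j < cs.length := by omega
    rw [List.getElem_take] at hjy
    have hyc : y ∈ cs := hjy ▸ List.getElem_mem hjlen
    rcases lt_or_eq_of_le (hglob y hyc) with h | h
    · exact h
    · exact absurd (htie j hjlen (hjy ▸ h.symm)) (by omega)
  · intro y hy
    exact hglob y (List.mem_of_mem_drop hy)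

theorem pvBS_spec (uniq : List Char) (o : Int)
    (hmono : ∀ i j, (hi : i < uniq.length) → (hj : j < uniq.length) → i ≤ j → ((uniq[i].toNat : Int)) ≤ ((uniq[j].toNat : Int))) :
    ∀ (fuel lo hi : Nat), hi - lo ≤ fuel → lo ≤ hi → hi ≤ uniq.length →
    (∀ j, (hj : j < uniq.length) → j < lo → ((uniq[j].toNat : Int)) < o) →
    (∀ j, (hj : j < uniq.length) → hi ≤ j → o ≤ ((uniq[j].toNat : Int))) →
    (pvBS uniq o lo hi ≤ uniq.length ∧
     (∀ j, (hj : j < uniq.length) → j < pvBS uniq o lo hi → ((uniq[j].toNat : Int)) < o) ∧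
     (∀ j, (hj : j < uniq.length) → pvBS uniq o lo hi ≤ j → o ≤ ((uniq[j].toNat : Int)))) := by
  intro fuel
  induction fuel with
  | zero =>
    intro lo hi hf hlh hhl hbelow habove
    have hnot : ¬ lo < hi := by omega
    rw [pvBS, dif_neg hnot]
    exact ⟨by omega, hbelow, fun j hj hjlo => habove j hj (by omega)⟩
  | succ n ih =>
    intro lo hi hf hlh hhl hbelow habove
    by_cases h : lo < hi
    · rw [pvBS, dif_pos h]
      have hmid : (lo + hi) / 2 < uniq.length := by omega
      have hgd : uniq.getD ((lo + hi) / 2) 'a' = uniq[(lo + hi) / 2] := List.getD_eq_getElem uniq 'a' hmid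
      by_cases hc : ((uniq.getD ((lo + hi) / 2) 'a').toNat : Int) < o
      · simp only [if_pos hc]
        refine ih ((lo + hi) / 2 + 1) hi (by omega) (by omega) hhl ?_ habove
        intro j hj hjlt
        calc ((uniq[j].toNat : Int)) ≤ ((uniq[(lo + hi) / 2].toNat : Int)) := hmono j _ hj hmid (by omega)
          _ < o := by rw [hgd] at hc; exact hc
      · simp only [if_neg hc]
        refine ih lo ((lo + hi) / 2) (by omega) (by omega) (by omega) hbelow ?_
        intro j hj hjge
        calc o ≤ ((uniq[(lo + hi) / 2].toNat : Int)) := by rw [hgd] at hc; omega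
          _ ≤ ((uniq[j].toNat : Int)) := hmono _ j hmid hj hjge
    · rw [pvBS, dif_neg h]
      exact ⟨by omega, hbelow, fun j hj hjlo => habove j hj (by omega)⟩

theorem pv_char_eq (cs : List Char) (hcs : cs ≠ []) (ch : Char) (acc : List Char) :
    pvAStep cs acc ch = acc ++ pvBChar cs (PySem.List.sorted (PySem.Set.ofList cs) (fun c => c) false) ch := by
  set uniq := PySem.List.sorted (PySem.Set.ofList cs) (fun c => c) false with huniq
  by_cases hin : PySem.Chars.isIn [ch] cs
  · simp [pvAStep, pvBChar, hin]
  · have hinf : PySem.Chars.isIn [ch] cs = false := by simpa using hin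
    have hch : ch ∉ cs := fun h =>
      ((PySem.Chars.isIn_eq_false_iff _ _).mp hinf) ((pv_mem_singleton_infix ch cs).mpr h)
    have hmemu : ∀ y : Char, y ∈ uniq ↔ y ∈ cs := by
      intro y; rw [huniq, PySem.List.mem_sorted, PySem.Set.mem_ofList]
    have hpw : uniq.Pairwise (· < ·) := huniq ▸ PySem.List.sorted_ofList_pairwise_lt cs
    have hlt : ∀ i j, (hi : i < uniq.length) → (hj : j < uniq.length) → i < j → ((uniq[i].toNat : Int)) < ((uniq[j].toNat : Int)) := by
      intro i j hi hj hij
      exact_mod_cast pv_toNat_lt (List.pairwise_iff_getElem.mp hpw i j hi hj hij)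
    have hmono : ∀ i j, (hi : i < uniq.length) → (hj : j < uniq.length) → i ≤ j → ((uniq[i].toNat : Int)) ≤ ((uniq[j].toNat : Int)) := by
      intro i j hi hj hij
      rcases Nat.lt_or_eq_of_le hij with h | h
      · exact le_of_lt (hlt i j hi hj h)
      · subst h; rfl
    have hune : uniq ≠ [] := by
      obtain ⟨y, hy⟩ := List.exists_mem_of_ne_nil cs hcs
      have hyu : y ∈ uniq := (hmemu y).mpr hy
      intro h; rw [h] at hyu; simp at hyu
    have hinj : ∀ y z : Char, ((y.toNat : Int)) = ((z.toNat : Int)) → y = z := by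
      intro y z h; exact pv_toNat_inj (by exact_mod_cast h)
    have hidx : ∀ y ∈ cs, ∃ j, ∃ hj : j < uniq.length, uniq[j] = y :=
      fun y hy => List.mem_iff_getElem.mp ((hmemu y).mpr hy)
    obtain ⟨hlole, hbelow, habove⟩ :=
      pvBS_spec uniq ((ch.toNat : Int)) hmono uniq.length 0 uniq.length (by omega) (by omega) (le_refl _)
        (fun j hj h0 => absurd h0 (by omega)) (fun j hj hge => absurd hj (by omega))
    set o : Int := ((ch.toNat : Int)) with ho
    set lo := pvBS uniq o 0 uniq.length with hlodef
    have habove' : ∀ j, (hj : j < uniq.length) → lo ≤ j → o < ((uniq[j].toNat : Int)) := by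
      intro j hj hle
      rcases lt_or_eq_of_le (habove j hj hle) with h | h
      · exact h
      · exact absurd ((hmemu _).mp (List.getElem_mem hj)) (by rw [← hinj ch uniq[j] h]; exact hch)
    have habs : ∀ p : Int, p ≤ o → |p - o| = o - p := by
      intro p hp; rw [abs_of_nonpos (by omega)]; ring
    have habs' : ∀ p : Int, o ≤ p → |p - o| = p - o := fun p hp => abs_of_nonneg (by omega)
    have hkey : ∀ m : Char, m ∈ cs →
        (∀ y ∈ cs, pvAbsDiff m ch ≤ pvAbsDiff y ch) →
        (∀ j, (hj : j < cs.length) → pvAbsDiff cs[j] ch = pvAbsDiff m ch → cs.idxOf m ≤ j) →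
        ∀ res : List Char, res = [m] →
        pvAStep cs acc ch = acc ++ res := by
      intro m h1 h2 h3 res hres
      rw [hres, pvAStep, if_neg (by simp [hinf]),
        pv_min?_eq cs (fun c => pvAbsDiff c ch) m h1 h2 h3]
    -- now evaluate pvBChar
    rw [pvBChar.eq_def, if_neg (by simp [hinf])]
    simp only [← ho, ← hlodef]
    by_cases h0 : lo = 0
    · -- nearest is the smallest element
      obtain ⟨x, t, hxt⟩ := List.exists_cons_of_ne_nil hune
      have hL : 0 < uniq.length := List.length_pos_iff.mpr hune
      have hx0 : uniq[0]'hL = x := by simp [hxt]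
      rw [if_pos h0, hxt]
      apply hkey x ((hmemu x).mp (hxt ▸ List.mem_cons_self)) ?_ ?_ [x] rfl
      · intro y hy
        obtain ⟨j, hj, hjy⟩ := hidx y hy
        have hyo : o < ((y.toNat : Int)) := hjy ▸ habove' j hj (by omega)
        have hxo : o < ((x.toNat : Int)) := hx0 ▸ habove' 0 hL (by omega)
        have hxy : ((x.toNat : Int)) ≤ ((y.toNat : Int)) := by
          have := hmono 0 j hL hj (by omega); rw [hx0, hjy] at this; exact this
        simp only [pvAbsDiff, ← ho]
        rw [habs' _ (le_of_lt hxo), habs' _ (le_of_lt hyo)]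
        omega
      · intro j hj htie
        have hy : cs[j] ∈ cs := List.getElem_mem hj
        obtain ⟨jy, hjy, hjye⟩ := hidx _ hy
        have hyo : o < ((cs[j].toNat : Int)) := hjye ▸ habove' jy hjy (by omega)
        have hxo : o < ((x.toNat : Int)) := hx0 ▸ habove' 0 hL (by omega)
        simp only [pvAbsDiff, ← ho] at htie
        rw [habs' _ (le_of_lt hyo), habs' _ (le_of_lt hxo)] at htie
        exact pv_idxOf_le x cs j hj (hinj _ _ (by omega))
    · rw [if_neg h0]
      by_cases hLo : lo = uniq.length
      · -- nearest is the largest element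
        have hL : 0 < uniq.length := List.length_pos_iff.mpr hune
        have hL1 : uniq.length - 1 < uniq.length := by omega
        have hlast : uniq.getLast? = some (uniq[uniq.length - 1]'hL1) := by
          rw [List.getLast?_eq_getElem?, List.getElem?_eq_getElem hL1]
        rw [if_pos hLo, hlast]
        set m := uniq[uniq.length - 1]'hL1 with hm
        apply hkey m ((hmemu m).mp (List.getElem_mem hL1)) ?_ ?_ [m] rfl
        · intro y hy
          obtain ⟨j, hj, hjy⟩ := hidx y hy
          have hyo : ((y.toNat : Int)) < o := hjy ▸ hbelow j hj (by omega)
          have hmo : ((m.toNat : Int)) < o := hbelow _ hL1 (by omega)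
          have hxy : ((y.toNat : Int)) ≤ ((m.toNat : Int)) := by
            have := hmono j (uniq.length - 1) hj hL1 (by omega); rw [hjy] at this; exact this
          simp only [pvAbsDiff, ← ho]
          rw [habs _ (le_of_lt hmo), habs _ (le_of_lt hyo)]
          omega
        · intro j hj htie
          have hy : cs[j] ∈ cs := List.getElem_mem hj
          obtain ⟨jy, hjy, hjye⟩ := hidx _ hy
          have hyo : ((cs[j].toNat : Int)) < o := hjye ▸ hbelow jy hjy (by omega)
          have hmo : ((m.toNat : Int)) < o := hbelow _ hL1 (by omega)
          simp only [pvAbsDiff, ← ho] at htie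
          rw [habs _ (le_of_lt hyo), habs _ (le_of_lt hmo)] at htie
          exact pv_idxOf_le m cs j hj (hinj _ _ (by omega))
      · -- strictly between: candidates uniq[lo-1] and uniq[lo]
        have hlo1 : lo - 1 < uniq.length := by omega
        have hlo2 : lo < uniq.length := by omega
        rw [if_neg hLo, List.getElem?_eq_getElem hlo1, List.getElem?_eq_getElem hlo2]
        set a := uniq[lo - 1]'hlo1 with ha
        set b := uniq[lo]'hlo2 with hb
        have hac : a ∈ cs := (hmemu a).mp (List.getElem_mem hlo1)
        have hbc : b ∈ cs := (hmemu b).mp (List.getElem_mem hlo2)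
        have hao : ((a.toNat : Int)) < o := hbelow _ hlo1 (by omega)
        have hbo : o < ((b.toNat : Int)) := habove' _ hlo2 (by omega)
        have hia : pvIdxOf cs a 0 = ((cs.idxOf a : Int)) := by simpa using pv_idxOf_eq a cs hac 0
        have hib : pvIdxOf cs b 0 = ((cs.idxOf b : Int)) := by simpa using pv_idxOf_eq b cs hbc 0
        set da := o - ((a.toNat : Int)) with hda
        set db := ((b.toNat : Int)) - o with hdb
        show pvAStep cs acc ch = acc ++ (if da < db ∨ (da = db ∧ pvIdxOf cs a 0 < pvIdxOf cs b 0) then [a] else [b])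
        have hfa : pvAbsDiff a ch = da := by
          simp only [pvAbsDiff, ← ho]; rw [habs _ (le_of_lt hao)]
        have hfb : pvAbsDiff b ch = db := by
          simp only [pvAbsDiff, ← ho]; rw [habs' _ (le_of_lt hbo)]
        have hf : ∀ y ∈ cs,
            (((y.toNat : Int)) < o ∧ pvAbsDiff y ch = o - ((y.toNat : Int)) ∧ ((y.toNat : Int)) ≤ ((a.toNat : Int))) ∨
            (o < ((y.toNat : Int)) ∧ pvAbsDiff y ch = ((y.toNat : Int)) - o ∧ ((b.toNat : Int)) ≤ ((y.toNat : Int))) := by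
          intro y hy
          obtain ⟨j, hj, hjy⟩ := hidx y hy
          by_cases hjl : j < lo
          · have h1 : ((y.toNat : Int)) < o := hjy ▸ hbelow j hj hjl
            have h3 : ((y.toNat : Int)) ≤ ((a.toNat : Int)) := by
              have := hmono j (lo - 1) hj hlo1 (by omega); rw [hjy] at this; exact this
            exact Or.inl ⟨h1, by simp only [pvAbsDiff, ← ho]; exact habs _ (le_of_lt h1), h3⟩
          · have h1 : o < ((y.toNat : Int)) := hjy ▸ habove' j hj (by omega)
            have h3 : ((b.toNat : Int)) ≤ ((y.toNat : Int)) := by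
              have := hmono lo j hlo2 hj (by omega); rw [hjy] at this; exact this
            exact Or.inr ⟨h1, by simp only [pvAbsDiff, ← ho]; exact habs' _ (le_of_lt h1), h3⟩
        by_cases hcond : da < db ∨ (da = db ∧ pvIdxOf cs a 0 < pvIdxOf cs b 0)
        · rw [if_pos hcond]
          have hdad : da ≤ db := by rcases hcond with h | ⟨h, _⟩ <;> omega
          apply hkey a hac ?_ ?_ [a] rfl
          · intro y hy
            rcases hf y hy with ⟨h1, h2, h3⟩ | ⟨h1, h2, h3⟩ <;> rw [hfa, h2] <;> omega
          · intro j hj htie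
            rw [hfa] at htie
            rcases hf cs[j] (List.getElem_mem hj) with ⟨h1, h2, h3⟩ | ⟨h1, h2, h3⟩
            · rw [h2] at htie
              exact pv_idxOf_le a cs j hj (hinj _ _ (by omega))
            · rw [h2] at htie
              have hyb : cs[j] = b := hinj _ _ (by omega)
              rcases hcond with h | ⟨_, hlt2⟩
              · omega
              · rw [hia, hib] at hlt2
                have := pv_idxOf_le b cs j hj hyb
                omega
        · rw [if_neg hcond]
          have hnd : ¬ da < db := fun h => hcond (Or.inl h)
          have htieidx : da = db → ((cs.idxOf b : Int)) ≤ ((cs.idxOf a : Int)) := by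
            intro h
            by_contra hc
            exact hcond (Or.inr ⟨h, by rw [hia, hib]; omega⟩)
          apply hkey b hbc ?_ ?_ [b] rfl
          · intro y hy
            rcases hf y hy with ⟨h1, h2, h3⟩ | ⟨h1, h2, h3⟩ <;> rw [hfb, h2] <;> omega
          · intro j hj htie
            rw [hfb] at htie
            rcases hf cs[j] (List.getElem_mem hj) with ⟨h1, h2, h3⟩ | ⟨h1, h2, h3⟩
            · rw [h2] at htie
              have hdd : da = db := by omega
              have hya : cs[j] = a := hinj _ _ (by omega)
              have h5 := htieidx hdd
              have := pv_idxOf_le a cs j hj hya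
              omega
            · rw [h2] at htie
              exact pv_idxOf_le b cs j hj (hinj _ _ (by omega))


-- ===== VERDICT (by name: the statement is the Claim_ definition above) =====
theorem map_to_custom_characters_spec : Claim_equal_map_to_custom_characters := by
  intro word custom_chars _ hpre
  unfold Spec_map_to_custom_characters map_to_custom_characters map_to_custom_characters_alt
  by_cases hcs : custom_chars.toList = []
  · rcases hpre with h | h
    · exact absurd (String.toList_eq_nil_iff.mp hcs) h
    · subst h; simp
  · have hfun : pvAStep custom_chars.toList
        = fun acc ch => acc ++ pvBChar custom_chars.toList (PySem.List.sorted (PySem.Set.ofList custom_chars.toList) (fun c => c) false) ch := by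
      funext acc ch
      exact pv_char_eq custom_chars.toList hcs ch acc
    rw [hfun]
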